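-- pv_equiv track=rewrite | github.com/MahakG/SemEval-16 | codi/tokenize/twitter_ELiRF.py | voting_monolabel_dic
-- ===== SOURCE A (Python) =====
-- def voting_monolabel_dic(hypos):
--     result = {}
--     for k in hypos[0].keys():
--         all1 = [hypo.get(k, None) for hypo in hypos] #+ [hypos[2][k]]
--         all2 = sorted([(all1.count(x), x) for x in set(all1)], reverse=True)
--         m = all2[0][1]
--         result[k] = m
--     return result
-- ===== SOURCE B (Python) =====
-- def voting_monolabel_dic(hypos):
--     result = {}
--     for k in hypos[0].keys():
--         vals = sorted(hypo.get(k, None) for hypo in hypos)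
--         best = None
--         best_len = 0
--         prev = None
--         run = 0
--         for v in vals:
--             run = run + 1 if (run > 0 and v == prev) else 1
--             if run >= best_len:
--                 best, best_len = v, run
--             prev = v
--         result[k] = best
--     return result
-- ===== Notes on version B (the rewrite author's own statement) =====
-- stated objective: alternative
-- what changed: A counts every distinct value by repeated full scans of the value list and sorts the (count, value) pairs to take the first; B uses a sort-then-run-scan algorithm with no counting structure at all: it sorts each key's value list and finds the winner in one linear scan of runs of equal adjacent values, updating on >= so that the largest value among maximal runs wins, which matches A's (count, value) tie-break because a sorted list keeps equal values adjacent.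
-- outside the precondition, e.g. on voting_monolabel_dic([{'a': 'x'}, {'a': 'x'}, {}]): A returns {'a': 'x'}, B raises TypeError
import Mathlib
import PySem

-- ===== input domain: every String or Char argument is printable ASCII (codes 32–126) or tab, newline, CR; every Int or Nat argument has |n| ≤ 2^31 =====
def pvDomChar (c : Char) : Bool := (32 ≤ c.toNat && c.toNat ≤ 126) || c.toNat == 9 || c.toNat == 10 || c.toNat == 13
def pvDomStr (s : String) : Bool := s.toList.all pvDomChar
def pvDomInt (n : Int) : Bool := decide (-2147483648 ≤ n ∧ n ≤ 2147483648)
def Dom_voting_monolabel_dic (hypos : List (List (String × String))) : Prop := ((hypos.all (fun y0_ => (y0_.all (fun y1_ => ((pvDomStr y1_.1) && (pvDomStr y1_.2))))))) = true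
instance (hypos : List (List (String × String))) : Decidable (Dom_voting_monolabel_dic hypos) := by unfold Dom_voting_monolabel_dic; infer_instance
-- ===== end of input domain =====

-- B replaces A's count-every-distinct-value-then-sort-pairs selection by a sort-then-run-scan:
-- sort each key's value list and pick the winner in one linear scan over runs of equal adjacent
-- values (objective: alternative; same return value, no counting structure at all).

-- ===== PORT A =====
-- dicts are PySem.Dict over the association lists; hypos[0] → pyGet? (IndexError on [] is excluded by Pre_);
-- hypo.get(k, None) → getD k "" ("" stands for the None that Pre_ makes unreachable: every key of hypos[0]
-- is present in every hypo); all2[0][1] → pyGet? 0 (all2 is nonempty since hypos ≠ [] under Pre_).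
def voting_monolabel_dic (hypos : List (List (String × String))) : List (String × String) :=
  let result : PySem.Dict String String :=
    (PySem.Dict.keys (PySem.Dict.mk ((PySem.List.pyGet? hypos 0).getD []))).foldl
      (fun result k =>
        let all1 : List String := hypos.map (fun hypo => (PySem.Dict.mk hypo).getD k "")
        let all2 : List (Int × String) :=
          PySem.List.sorted2 ((PySem.Set.ofList all1).map (fun x => ((all1.count x : Int), x)))
            (fun p => p.1) (fun p => p.2) true
        let m : String := ((PySem.List.pyGet? all2 0).map (fun p => p.2)).getD ""
        result.insert k m)
      PySem.Dict.empty
  result.items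

-- ===== PORT B =====
-- same conventions as port A: hypo.get(k, None) → getD k "" (None unreachable under Pre_);
-- Python's best/prev start as None → Option String none; the final best is some _ because the
-- sorted value list is nonempty under Pre_ (hypos ≠ []), rendered by .getD "".
def voting_monolabel_dic_alt (hypos : List (List (String × String))) : List (String × String) :=
  let result : PySem.Dict String String :=
    (PySem.Dict.keys (PySem.Dict.mk ((PySem.List.pyGet? hypos 0).getD []))).foldl
      (fun result k =>
        let vals : List String :=
          PySem.List.sorted (hypos.map (fun hypo => (PySem.Dict.mk hypo).getD k ""))
            (fun x => x) false
        let st : Option String × Int × Option String × Int :=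
          vals.foldl
            (fun st v =>
              let run : Int := if st.2.2.2 > 0 && some v == st.2.2.1 then st.2.2.2 + 1 else 1
              let bb : Option String × Int :=
                if run ≥ st.2.1 then (some v, run) else (st.1, st.2.1)
              (bb.1, bb.2, some v, run))
            (none, 0, none, 0)
        result.insert k (st.1.getD ""))
      PySem.Dict.empty
  result.items

-- ===== PRECONDITION & SPEC =====
-- Pre_ excludes: empty hypos (A raises IndexError on hypos[0]); inputs where some hypothesis lacks a key of
-- hypos[0] — there A votes with None, which raises TypeError on a count tie and otherwise can put None (not a
-- str) in the result; and association lists with duplicate keys inside one hypothesis, which correspond to no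
-- Python dict at all.
def Pre_voting_monolabel_dic (hypos : List (List (String × String))) : Prop :=
  hypos ≠ [] ∧ (∀ h ∈ hypos, (h.map Prod.fst).Nodup) ∧
    (∀ k ∈ (hypos.head?.getD []).map Prod.fst, ∀ h ∈ hypos, k ∈ h.map Prod.fst)
instance (hypos : List (List (String × String))) : Decidable (Pre_voting_monolabel_dic hypos) := by
  unfold Pre_voting_monolabel_dic; infer_instance

def pvWitness_voting_monolabel_dic : (List (List (String × String))) :=
  [[("a", "x"), ("b", "y")], [("a", "z"), ("b", "y")], [("a", "z"), ("b", "w")]]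

def Spec_voting_monolabel_dic (hypos : List (List (String × String))) (out : List (String × String)) : Prop := out = voting_monolabel_dic_alt hypos
instance (hypos : List (List (String × String))) (out : List (String × String)) : Decidable (Spec_voting_monolabel_dic hypos out) := by unfold Spec_voting_monolabel_dic; infer_instance

-- ===== CLAIM (what is proved, stated in full; the proofs are below) =====
def Claim_equal_voting_monolabel_dic : Prop := ∀ (hypos : List (List (String × String))), Dom_voting_monolabel_dic hypos → Pre_voting_monolabel_dic hypos → Spec_voting_monolabel_dic hypos (voting_monolabel_dic hypos)

-- ===== LEMMAS AND PROOFS =====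

-- lexicographic dominance by (c x, x): both ports' per-key winners are the unique maximum of it
def pvLex (c : String → Int) (x y : String) : Prop := c x < c y ∨ (c x = c y ∧ x ≤ y)

theorem pvLex_refl (c : String → Int) (x : String) : pvLex c x x := Or.inr ⟨rfl, le_refl _⟩

theorem pvLex_trans {c : String → Int} {x y z : String}
    (h₁ : pvLex c x y) (h₂ : pvLex c y z) : pvLex c x z := by
  rcases h₁ with h | ⟨e₁, l₁⟩ <;> rcases h₂ with h' | ⟨e₂, l₂⟩
  · exact Or.inl (h.trans h')
  · exact Or.inl (e₂ ▸ h)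
  · exact Or.inl (e₁ ▸ h')
  · exact Or.inr ⟨e₁.trans e₂, l₁.trans l₂⟩

theorem pvCond_true {c : String → Int} {x y : String}
    (h : (decide (c x < c y) || (!decide (c y < c x) && decide (x < y))) = true) : pvLex c x y := by
  simp only [Bool.or_eq_true, decide_eq_true_eq, Bool.and_eq_true, Bool.not_eq_true',
    decide_eq_false_iff_not] at h
  by_cases hcc : c x < c y
  · exact Or.inl hcc
  · rcases h with h | ⟨h1, h2⟩
    · exact Or.inl h
    · exact Or.inr ⟨by omega, le_of_lt h2⟩

theorem pvCond_false {c : String → Int} {x y : String}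
    (h : (decide (c x < c y) || (!decide (c y < c x) && decide (x < y))) = false) : pvLex c y x := by
  simp only [Bool.or_eq_false_iff, decide_eq_false_iff_not, Bool.and_eq_false_iff,
    decide_eq_false_iff_not] at h
  rcases h with ⟨h1, h2⟩
  by_cases hcc : c y < c x
  · exact Or.inl hcc
  · rcases h2 with h2 | h2
    · exact absurd h2 (by simpa using hcc)
    · exact Or.inr ⟨by omega, le_of_not_gt h2⟩

-- "r is a per-key winner of L": r occurs in L and (count, value) is lexicographically maximal at r
def pvIsSel (L : List String) (r : String) : Prop :=
  r ∈ L ∧ ∀ x ∈ L, pvLex (fun z => (L.count z : Int)) x r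

theorem pvIsSel_unique {L : List String} {r₁ r₂ : String}
    (h₁ : pvIsSel L r₁) (h₂ : pvIsSel L r₂) : r₁ = r₂ := by
  rcases h₁ with ⟨m₁, hmax₁⟩
  rcases h₂ with ⟨m₂, hmax₂⟩
  rcases hmax₁ r₂ m₂ with h | ⟨hc, hle⟩ <;> rcases hmax₂ r₁ m₁ with h' | ⟨hc', hle'⟩
  · omega
  · omega
  · omega
  · exact le_antisymm hle' hle

theorem pv_pyGet?_zero {α : Type} (x : α) (xs : List α) :
    PySem.List.pyGet? (x :: xs) (0 : Int) = some x := by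
  have h : ((0 : Nat) : Int) = (0 : Int) := by norm_num
  rw [← h, PySem.List.pyGet?_natCast]
  rfl

theorem pv_insertBy_cons {α : Type} (before : α → α → Bool) (x y : α) (r : List α) :
    PySem.List.insertBy before x (y :: r) =
      if before x y then x :: y :: r else y :: PySem.List.insertBy before x r := by
  rfl

theorem pv_hd_foldl {α : Type} (before : α → α → Bool) :
    ∀ (t : List α) (y : α) (r : List α),
      (t.foldl (fun acc x => PySem.List.insertBy before x acc) (y :: r)).head? =
        some (t.foldl (fun m x => if before x m then x else m) y) := by
  intro t
  induction t with
  | nil => intro y r; rfl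
  | cons x t ih =>
    intro y r
    simp only [List.foldl_cons, pv_insertBy_cons]
    by_cases h : before x y
    · simp [h, ih x (y :: r)]
    · simp [h, ih y (PySem.List.insertBy before x r)]

theorem pv_sorted2_rev_head {α κ₁ κ₂ : Type} [LT κ₁] [DecidableLT κ₁] [LT κ₂] [DecidableLT κ₂]
    (p : α) (ps : List α) (k1 : α → κ₁) (k2 : α → κ₂) :
    (PySem.List.sorted2 (p :: ps) k1 k2 true).head? =
      some (ps.foldl (fun m x =>
        if (decide (k1 m < k1 x) || (!decide (k1 x < k1 m) && decide (k2 m < k2 x))) then x else m) p) := by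
  simp only [PySem.List.sorted2, List.foldl_cons]
  exact pv_hd_foldl _ ps p []

-- the running lexicographic maximum over values x, compared by (c x, x); A's per-key
-- selection reduces to this single fold
def pvRun (c : String → Int) (S : List String) (x0 : String) : String :=
  S.foldl (fun m x => if (decide (c m < c x) || (!decide (c x < c m) && decide (m < x))) then x else m) x0

theorem pv_foldl_pairs_A (S : List String) (c : String → Int) :
    ∀ (x0 : String),
      ((S.map (fun x => (c x, x))).foldl
          (fun m p => if (decide (m.1 < p.1) || (!decide (p.1 < m.1) && decide (m.2 < p.2))) then p else m)
          (c x0, x0)) =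
        (c (pvRun c S x0), pvRun c S x0) := by
  induction S with
  | nil => intro x0; rfl
  | cons x S ih =>
    intro x0
    simp only [List.map_cons, List.foldl_cons, pvRun] at ih ⊢
    split_ifs with h
    · exact ih x
    · exact ih x0

-- the running lexicographic maximum is a member and dominates every element
theorem pvRun_spec (c : String → Int) (S : List String) :
    ∀ (x0 : String), pvRun c S x0 ∈ x0 :: S ∧
      ∀ x ∈ x0 :: S, pvLex c x (pvRun c S x0) := by
  induction S with
  | nil =>
    intro x0
    refine ⟨List.mem_singleton.mpr rfl, ?_⟩
    intro x hx
    rcases List.mem_singleton.mp hx with rfl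
    exact pvLex_refl c x
  | cons s S ih =>
    intro x0
    have hrun : pvRun c (s :: S) x0 =
        pvRun c S (if (decide (c x0 < c s) || (!decide (c s < c x0) && decide (x0 < s))) then s else x0) := by
      simp only [pvRun, List.foldl_cons]
    by_cases h : (decide (c x0 < c s) || (!decide (c s < c x0) && decide (x0 < s))) = true
    · rw [hrun, if_pos h]
      rcases ih s with ⟨hmem, hmax⟩
      refine ⟨?_, ?_⟩
      · rcases List.mem_cons.mp hmem with h' | h'
        · rw [h']; exact List.mem_cons_of_mem _ List.mem_cons_self
        · exact List.mem_cons_of_mem _ (List.mem_cons_of_mem _ h')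
      · intro x hx
        rcases List.mem_cons.mp hx with rfl | hx'
        · exact pvLex_trans (pvCond_true h) (hmax s List.mem_cons_self)
        · exact hmax x hx'
    · rw [hrun, if_neg h]
      rcases ih x0 with ⟨hmem, hmax⟩
      refine ⟨?_, ?_⟩
      · rcases List.mem_cons.mp hmem with h' | h'
        · rw [h']; exact List.mem_cons_self
        · exact List.mem_cons_of_mem _ (List.mem_cons_of_mem _ h')
      · intro x hx
        rcases List.mem_cons.mp hx with rfl | hx'
        · exact hmax x List.mem_cons_self
        · rcases List.mem_cons.mp hx' with rfl | hx''
          · exact pvLex_trans (pvCond_false (Bool.eq_false_iff.mpr h))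
              (hmax x0 List.mem_cons_self)
          · exact hmax x (List.mem_cons_of_mem _ hx'')

-- Set.ofList of a nonempty list starts with its first element
theorem pv_foldl_add_append {α : Type} [BEq α] :
    ∀ (vs : List α) (acc : List α), ∃ t, vs.foldl PySem.Set.add acc = acc ++ t := by
  intro vs
  induction vs with
  | nil => intro acc; exact ⟨[], by simp⟩
  | cons v vs ih =>
    intro acc
    simp only [List.foldl_cons]
    rcases ih (PySem.Set.add acc v) with ⟨t, ht⟩
    by_cases h : acc.contains v
    · exact ⟨t, by simpa [PySem.Set.add, h] using ht⟩
    · exact ⟨v :: t, by simpa [PySem.Set.add, h] using ht⟩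

theorem pv_ofList_cons (v : String) (vs : List String) :
    ∃ t, PySem.Set.ofList (v :: vs) = v :: t := by
  rcases pv_foldl_add_append vs [v] with ⟨t, ht⟩
  exact ⟨t, by simpa [PySem.Set.ofList_eq_foldl, PySem.Set.add] using ht⟩

-- the per-key value list and the two ports' per-key selections, as functions of that list
def pvAll1 (hypos : List (List (String × String))) (k : String) : List String :=
  hypos.map (fun hypo => (PySem.Dict.mk hypo).getD k "")

def pvSelA (L : List String) : String :=
  ((PySem.List.pyGet?
      (PySem.List.sorted2
        ((PySem.Set.ofList L).map (fun x => ((L.count x : Int), x)))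
        (fun p => p.1) (fun p => p.2) true)
      0).map (fun p => p.2)).getD ""

-- B's run-scan step (identical to the lambda in the port)
def pvStep (st : Option String × Int × Option String × Int) (v : String) :
    Option String × Int × Option String × Int :=
  let run : Int := if st.2.2.2 > 0 && some v == st.2.2.1 then st.2.2.2 + 1 else 1
  let bb : Option String × Int :=
    if run ≥ st.2.1 then (some v, run) else (st.1, st.2.1)
  (bb.1, bb.2, some v, run)

def pvSelB (L : List String) : String :=
  ((PySem.List.sorted L (fun x => x) false).foldl pvStep (none, 0, none, 0)).1.getD ""

-- invariant of B's run scan over a processed prefix P whose elements never exceed the yet-unseen ones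
def pvInv (P : List String) (st : Option String × Int × Option String × Int) : Prop :=
  ∃ b p, st = (some b, (P.count b : Int), some p, (P.count p : Int)) ∧
    b ∈ P ∧ p ∈ P ∧ (∀ z ∈ P, z ≤ p) ∧
    (∀ v ∈ P, P.count v ≤ P.count b) ∧ (∀ v ∈ P, P.count v = P.count b → v ≤ b)

theorem pv_count_append_self (P : List String) (y : String) :
    (P ++ [y]).count y = P.count y + 1 := by
  simp [List.count_append]

theorem pv_count_append_ne (P : List String) (y v : String) (h : v ≠ y) :
    (P ++ [y]).count v = P.count v := by
  simp [List.count_append, Ne.symm h]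

theorem pvStep_eq (b p y : String) (cb cp : Int) (hcp : 0 < cp) :
    pvStep (some b, cb, some p, cp) y =
      if y = p then
        (if cp + 1 ≥ cb then (some y, cp + 1, some y, cp + 1) else (some b, cb, some y, cp + 1))
      else
        (if (1 : Int) ≥ cb then (some y, 1, some y, 1) else (some b, cb, some y, 1)) := by
  unfold pvStep
  by_cases hyp : y = p
  · subst hyp
    simp [hcp]
    split_ifs <;> rfl
  · simp [hyp, hcp]
    split_ifs <;> rfl

theorem pvStep_inv {P : List String} {st : Option String × Int × Option String × Int}
    (hinv : pvInv P st) {y : String} (hy : ∀ z ∈ P, z ≤ y) : pvInv (P ++ [y]) (pvStep st y) := by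
  obtain ⟨b, p, rfl, hb, hp, hpmax, hbound, hach⟩ := hinv
  have hcp : (0 : Int) < (P.count p : Int) := by exact_mod_cast List.count_pos_iff.mpr hp
  have hcb1 : 1 ≤ P.count b := List.count_pos_iff.mpr hb
  rw [pvStep_eq b p y _ _ hcp]
  by_cases hyp : y = p
  · subst hyp
    -- y continues the trailing run of equal values
    rw [if_pos rfl]
    have hcy : (P ++ [y]).count y = P.count y + 1 := pv_count_append_self P y
    by_cases h1 : (P.count y : Int) + 1 ≥ (P.count b : Int)
    · rw [if_pos h1]
      refine ⟨y, y, ?_, List.mem_append_right _ (List.mem_singleton.mpr rfl),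
        List.mem_append_right _ (List.mem_singleton.mpr rfl), ?_, ?_, ?_⟩
      · rw [hcy]; push_cast; ring_nf
      · intro z hz
        rcases List.mem_append.mp hz with hz | hz
        · exact hy z hz
        · rcases List.mem_singleton.mp hz with rfl; exact le_refl _
      · intro v hv
        rcases List.mem_append.mp hv with hv | hv
        · by_cases hvy : v = y
          · subst hvy; exact le_refl _
          · rw [pv_count_append_ne P y v hvy, hcy]
            have : P.count v ≤ P.count b := hbound v hv
            have h1' : P.count b ≤ P.count y + 1 := by exact_mod_cast h1
            omega
        · rcases List.mem_singleton.mp hv with rfl; exact le_refl _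
      · intro v hv _
        rcases List.mem_append.mp hv with hv | hv
        · exact hy v hv
        · rcases List.mem_singleton.mp hv with rfl; exact le_refl _
    · rw [if_neg h1]
      have hby : b ≠ y := by
        intro h; subst h; exact h1 (by omega)
      have hcb' : (P ++ [y]).count b = P.count b := pv_count_append_ne P y b hby
      have h1' : P.count y + 1 < P.count b := by
        have := lt_of_not_ge h1
        exact_mod_cast this
      refine ⟨b, y, ?_, List.mem_append_left _ hb,
        List.mem_append_right _ (List.mem_singleton.mpr rfl), ?_, ?_, ?_⟩
      · rw [hcb', hcy]; push_cast; ring_nf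
      · intro z hz
        rcases List.mem_append.mp hz with hz | hz
        · exact hy z hz
        · rcases List.mem_singleton.mp hz with rfl; exact le_refl _
      · intro v hv
        rcases List.mem_append.mp hv with hv | hv
        · by_cases hvy : v = y
          · subst hvy; rw [hcy, hcb']; omega
          · rw [pv_count_append_ne P y v hvy, hcb']; exact hbound v hv
        · rcases List.mem_singleton.mp hv with rfl; rw [hcy, hcb']; omega
      · intro v hv hveq
        rcases List.mem_append.mp hv with hv | hv
        · by_cases hvy : v = y
          · subst hvy; rw [hcy, hcb'] at hveq; omega
          · rw [pv_count_append_ne P y v hvy, hcb'] at hveq; exact hach v hv hveq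
        · rcases List.mem_singleton.mp hv with rfl
          rw [hcy, hcb'] at hveq; omega
  · -- y starts a new run; it is larger than, hence absent from, P
    rw [if_neg hyp]
    have hyP : y ∉ P := by
      intro h
      exact hyp (le_antisymm (hpmax y h) (hy p hp))
    have hcy0 : P.count y = 0 := List.count_eq_zero.mpr hyP
    have hcy : (P ++ [y]).count y = 1 := by rw [pv_count_append_self P y, hcy0]
    by_cases h1 : (1 : Int) ≥ (P.count b : Int)
    · rw [if_pos h1]
      have hcb : P.count b = 1 := by
        have : (P.count b : Int) ≤ 1 := h1
        have := hcb1; omega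
      refine ⟨y, y, ?_, List.mem_append_right _ (List.mem_singleton.mpr rfl),
        List.mem_append_right _ (List.mem_singleton.mpr rfl), ?_, ?_, ?_⟩
      · rw [hcy]; norm_num
      · intro z hz
        rcases List.mem_append.mp hz with hz | hz
        · exact hy z hz
        · rcases List.mem_singleton.mp hz with rfl; exact le_refl _
      · intro v hv
        rcases List.mem_append.mp hv with hv | hv
        · have hvy : v ≠ y := fun h => hyP (h ▸ hv)
          rw [pv_count_append_ne P y v hvy, hcy]
          have := hbound v hv; omega
        · rcases List.mem_singleton.mp hv with rfl; rw [hcy]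
      · intro v hv _
        rcases List.mem_append.mp hv with hv | hv
        · exact hy v hv
        · rcases List.mem_singleton.mp hv with rfl; exact le_refl _
    · rw [if_neg h1]
      have hby : b ≠ y := fun h => hyP (h ▸ hb)
      have hcb' : (P ++ [y]).count b = P.count b := pv_count_append_ne P y b hby
      have hcbgt : 1 < P.count b := by
        have := lt_of_not_ge h1
        exact_mod_cast this
      refine ⟨b, y, ?_, List.mem_append_left _ hb,
        List.mem_append_right _ (List.mem_singleton.mpr rfl), ?_, ?_, ?_⟩
      · rw [hcb', hcy]; norm_num
      · intro z hz
        rcases List.mem_append.mp hz with hz | hz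
        · exact hy z hz
        · rcases List.mem_singleton.mp hz with rfl; exact le_refl _
      · intro v hv
        rcases List.mem_append.mp hv with hv | hv
        · have hvy : v ≠ y := fun h => hyP (h ▸ hv)
          rw [pv_count_append_ne P y v hvy, hcb']; exact hbound v hv
        · rcases List.mem_singleton.mp hv with rfl; rw [hcy, hcb']; omega
      · intro v hv hveq
        rcases List.mem_append.mp hv with hv | hv
        · have hvy : v ≠ y := fun h => hyP (h ▸ hv)
          rw [pv_count_append_ne P y v hvy, hcb'] at hveq; exact hach v hv hveq
        · rcases List.mem_singleton.mp hv with rfl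
          rw [hcy, hcb'] at hveq; omega

theorem pv_fold_inv (L : List String) (hL : L ≠ []) (hp : L.Pairwise (· ≤ ·)) :
    pvInv L (L.foldl pvStep (none, 0, none, 0)) := by
  induction L using List.reverseRecOn with
  | nil => exact absurd rfl hL
  | append_singleton P y ih =>
    rw [List.foldl_append]
    have hpy : ∀ z ∈ P, z ≤ y := by
      have := (List.pairwise_append.mp hp).2.2
      intro z hz; exact this z hz y (List.mem_singleton.mpr rfl)
    rcases P with _ | ⟨v, P'⟩
    · refine ⟨y, y, ?_, List.mem_singleton.mpr rfl, List.mem_singleton.mpr rfl, ?_, ?_, ?_⟩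
      · simp [pvStep]
      · intro z hz; rcases List.mem_singleton.mp hz with rfl; exact le_refl _
      · intro v hv; rcases List.mem_singleton.mp hv with rfl; exact le_refl _
      · intro v hv _; rcases List.mem_singleton.mp hv with rfl; exact le_refl _
    · exact pvStep_inv (ih (by simp) (List.pairwise_append.mp hp).1) hpy

-- B's per-key selection is a winner of the unsorted value list
theorem pvSelB_isSel (L : List String) (hne : L ≠ []) : pvIsSel L (pvSelB L) := by
  have hperm : (PySem.List.sorted L (fun x => x) false).Perm L :=
    PySem.List.sorted_perm L (fun x => x) false
  have hVne : PySem.List.sorted L (fun x => x) false ≠ [] := by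
    intro h
    exact hne ((PySem.List.sorted_eq_nil_iff L (fun x => x) false).mp h)
  have hpw : (PySem.List.sorted L (fun x => x) false).Pairwise (· ≤ ·) := by
    have := PySem.List.sorted_pairwise L (fun x => x)
    simpa using this
  rcases pv_fold_inv _ hVne hpw with ⟨b, p, hst, hbmem, _, _, hbound, hach⟩
  have hsel : pvSelB L = b := by
    unfold pvSelB
    rw [hst]
    rfl
  rw [hsel]
  constructor
  · exact hperm.mem_iff.mp hbmem
  · intro x hx
    have hxV : x ∈ PySem.List.sorted L (fun x => x) false := hperm.mem_iff.mpr hx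
    have hcx := hperm.count_eq x
    have hcb := hperm.count_eq b
    have hb' : L.count x ≤ L.count b := by rw [← hcx, ← hcb]; exact hbound x hxV
    by_cases h2 : L.count x = L.count b
    · exact Or.inr ⟨show ((L.count x : Int)) = (L.count b : Int) by exact_mod_cast h2,
        hach x hxV (by rw [hcx, hcb]; exact h2)⟩
    · exact Or.inl (show ((L.count x : Int)) < (L.count b : Int) by
        exact_mod_cast lt_of_le_of_ne hb' h2)

-- A's per-key selection is a winner of the value list
theorem pvSelA_isSel (v0 : String) (vs : List String) :
    pvIsSel (v0 :: vs) (pvSelA (v0 :: vs)) := by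
  rcases pv_ofList_cons v0 vs with ⟨t, hS⟩
  have hsel : pvSelA (v0 :: vs) = pvRun (fun z => ((v0 :: vs).count z : Int)) t v0 := by
    unfold pvSelA
    rw [hS, List.map_cons]
    have hhead := pv_sorted2_rev_head (((v0 :: vs).count v0 : Int), v0)
      (t.map (fun x => (((v0 :: vs).count x : Int), x)))
      (fun p : Int × String => p.1) (fun p => p.2)
    rcases List.head?_eq_some_iff.mp hhead with ⟨rest, hrest⟩
    rw [hrest, pv_pyGet?_zero]
    have hA := pv_foldl_pairs_A t (fun z => ((v0 :: vs).count z : Int)) v0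
    simp only at hA ⊢
    rw [hA]
    rfl
  rw [hsel]
  rcases pvRun_spec (fun z => ((v0 :: vs).count z : Int)) t v0 with ⟨hmem, hmax⟩
  constructor
  · have : pvRun (fun z => ((v0 :: vs).count z : Int)) t v0 ∈ PySem.Set.ofList (v0 :: vs) :=
      hS ▸ hmem
    exact (PySem.Set.mem_ofList _ _).mp this
  · intro x hx
    have hxS : x ∈ v0 :: t := hS ▸ (PySem.Set.mem_ofList _ _).mpr hx
    exact hmax x hxS

-- ===== VERDICT (by name: the statement is the Claim_ definition above) =====
theorem voting_monolabel_dic_spec : Claim_equal_voting_monolabel_dic := by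
  intro hypos _hdom hpre
  obtain ⟨hne, _hnodup, _hpresent⟩ := hpre
  rcases hypos with _ | ⟨h0, hs⟩
  · exact absurd rfl hne
  unfold Spec_voting_monolabel_dic voting_monolabel_dic voting_monolabel_dic_alt
  rw [pv_pyGet?_zero]
  simp only [Option.getD_some]
  congr 1
  refine PySem.List.foldl_congr_mem _ _ _ _ ?_
  intro acc k _hkmem
  show acc.insert k (pvSelA (pvAll1 (h0 :: hs) k)) =
    acc.insert k (pvSelB (pvAll1 (h0 :: hs) k))
  have hall : pvAll1 (h0 :: hs) k =
      ((PySem.Dict.mk h0).getD k "") :: hs.map (fun hypo => (PySem.Dict.mk hypo).getD k "") := by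
    simp [pvAll1]
  have h1 : pvIsSel (pvAll1 (h0 :: hs) k) (pvSelA (pvAll1 (h0 :: hs) k)) := by
    rw [hall]; exact pvSelA_isSel _ _
  have h2 := pvSelB_isSel (pvAll1 (h0 :: hs) k) (by simp [pvAll1])
  rw [pvIsSel_unique h1 h2]
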